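-- pv_equiv track=rewrite | github.com/kyrpan/Personalization-of-Supermarket-Product-Recommendations | project.py | agg_vec
-- ===== SOURCE A (Python) =====
-- def agg_vec (baskets, products, category):
-- 	agg_list = []
-- 	for prod in baskets:
-- 		vector_list = []
-- 		for p in prod:
-- 			if p in products:
-- 				index = products.index(p)
-- 				vector_list.append(category[index])		#get subclass vector for every product
--
-- 		agg_vector = [sum(elts) for elts in zip(*vector_list)]		#aggregate subclass vectors for every basket
-- 		agg_list.append(agg_vector)
--
-- 	return agg_list
-- ===== SOURCE B (Python) =====
-- def _basket_vec(b, first, category):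
--     # count the basket's matched products once
--     cnt = {}
--     for p in b:
--         if p in first:
--             cnt[p] = cnt.get(p, 0) + 1
--     # one row per DISTINCT matched product, weighted by its multiplicity
--     rows = [(c, category[first[p]]) for p, c in cnt.items()]
--     if not rows:
--         return []
--     L = min(len(v) for _, v in rows)
--     return [sum(c * v[j] for c, v in rows) for j in range(L)]
--
--
-- def agg_vec(baskets, products, category):
--     # Aggregate by counting: index the catalogue once (first occurrence of a
--     # duplicated name wins, like list.index), then for each basket count its
--     # products and sum each distinct category row weighted by its multiplicity
--     # (sums commute, so this equals A's per-occurrence, basket-order summation).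
--     first = {}
--     for i, p in enumerate(products):
--         if p not in first:
--             first[p] = i
--     return [_basket_vec(b, first, category) for b in baskets]
-- ===== Notes on version B (the rewrite author's own statement) =====
-- stated objective: faster
-- what changed: B aggregates by counting: it indexes the catalogue once (first occurrence wins, like list.index), then for each basket counts its products and sums each distinct category row weighted by its multiplicity, instead of A's per-occurrence 'in'/.index scans of the products list and per-occurrence row summation.
import Mathlib
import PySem

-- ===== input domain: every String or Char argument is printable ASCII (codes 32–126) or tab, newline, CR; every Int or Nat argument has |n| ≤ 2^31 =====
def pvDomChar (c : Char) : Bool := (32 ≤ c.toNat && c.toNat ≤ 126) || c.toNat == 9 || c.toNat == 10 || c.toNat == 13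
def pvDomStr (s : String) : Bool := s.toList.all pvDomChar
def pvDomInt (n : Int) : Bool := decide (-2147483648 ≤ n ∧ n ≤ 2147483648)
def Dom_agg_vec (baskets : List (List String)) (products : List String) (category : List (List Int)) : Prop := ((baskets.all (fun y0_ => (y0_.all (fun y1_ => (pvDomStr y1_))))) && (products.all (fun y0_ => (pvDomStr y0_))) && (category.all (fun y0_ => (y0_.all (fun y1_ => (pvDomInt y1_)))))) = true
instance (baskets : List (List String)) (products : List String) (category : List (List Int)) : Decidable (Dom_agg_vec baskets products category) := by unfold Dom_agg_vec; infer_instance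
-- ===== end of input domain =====

-- B replaces A's per-occurrence scans of `products` by a different aggregation
-- algorithm: count each basket's products once, then make a single pass over the
-- catalogue accumulating count-weighted category rows (sums commute, so this
-- equals A's per-occurrence, basket-order summation).

-- ===== PORT A =====
-- exact port of the inner comprehension `[sum(elts) for elts in zip(*vl)]`:
-- zip(*vl) has min-row-length columns; zip() (vl = []) is empty.
def agg_sum_zip (vl : List (List Int)) : List Int :=
  match vl with
  | [] => []
  | v :: vs =>
    (List.range (vs.foldl (fun m w => min m w.length) v.length)).map
      (fun i => (v :: vs).foldl (fun s w => s + w.getD i 0) 0)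

def agg_vec (baskets : List (List String)) (products : List String) (category : List (List Int)) : List (List Int) :=
  baskets.foldl (fun agg_list prod =>
    let vector_list := prod.foldl (fun vl p =>
      if p ∈ products then
        -- category[products.index(p)]; pyGet? = none is Python's IndexError, excluded by Pre_
        vl ++ [(PySem.List.pyGet? category (((PySem.List.index? products p).getD 0 : Nat) : Int)).getD []]
      else vl) []
    agg_list ++ [agg_sum_zip vector_list]) []

-- ===== PORT B =====
-- port of Source B's helper _basket_vec
def agg_vec_basket (b : List String) (first : PySem.Dict String Int) (category : List (List Int)) : List Int :=
  -- if p in first: cnt[p] = cnt.get(p, 0) + 1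
  let cnt : PySem.Dict String Int :=
    b.foldl (fun d p => if first.contains p then d.insert p (d.getD p 0 + 1) else d) PySem.Dict.empty
  -- category[first[p]]; pyGet? = none is Python's IndexError, excluded by Pre_
  let rows : List (Int × List Int) :=
    cnt.items.map (fun pc => (pc.2, (PySem.List.pyGet? category (first.getD pc.1 0)).getD []))
  match rows with
  | [] => []
  | r :: rs =>
    (List.range (rs.foldl (fun m cv => min m cv.2.length) r.2.length)).map
      (fun j => (r :: rs).foldl (fun s cv => s + cv.1 * cv.2.getD j 0) 0)

def agg_vec_alt (baskets : List (List String)) (products : List String) (category : List (List Int)) : List (List Int) :=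
  -- for i, p in enumerate(products): if p not in first: first[p] = i
  let first : PySem.Dict String Int :=
    (PySem.List.enumerate products).foldl
      (fun d ip => if d.contains ip.2 then d else d.insert ip.2 ip.1) PySem.Dict.empty
  baskets.map (fun b => agg_vec_basket b first category)

-- ===== PRECONDITION & SPEC =====
-- Pre_ excludes exactly the inputs on which A (and B) raises IndexError: some basket
-- product's first index in products points past the end of category.
def Pre_agg_vec (baskets : List (List String)) (products : List String) (category : List (List Int)) : Prop :=
  (baskets.all (fun b => b.all (fun p =>
    match PySem.List.index? products p with
    | some i => decide (i < category.length)
    | none => true))) = true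

instance (baskets : List (List String)) (products : List String) (category : List (List Int)) : Decidable (Pre_agg_vec baskets products category) := by unfold Pre_agg_vec; infer_instance

def pvWitness_agg_vec : List (List String) × List String × List (List Int) :=
  ([["a"], ["b", "a", "a"]], ["a", "b"], [[1, 2], [3, 4]])

def Spec_agg_vec (baskets : List (List String)) (products : List String) (category : List (List Int)) (out : List (List Int)) : Prop := out = agg_vec_alt baskets products category
instance (baskets : List (List String)) (products : List String) (category : List (List Int)) (out : List (List Int)) : Decidable (Spec_agg_vec baskets products category out) := by unfold Spec_agg_vec; infer_instance

-- ===== CLAIM (what is proved, stated in full; the proofs are below) =====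
def Claim_equal_agg_vec : Prop := ∀ (baskets : List (List String)) (products : List String) (category : List (List Int)), Dom_agg_vec baskets products category → Pre_agg_vec baskets products category → Spec_agg_vec baskets products category (agg_vec baskets products category)

-- ===== LEMMAS AND PROOFS =====

-- the first-index dict built by B's enumerate pass looks up as list.index
theorem first_fold_get? (ps : List String) (s : Int) (d : PySem.Dict String Int) (p : String) :
    ((PySem.List.enumerate ps s).foldl
      (fun d ip => if d.contains ip.2 then d else d.insert ip.2 ip.1) d).get? p
    = ((d.get? p).orElse (fun _ => (PySem.List.index? ps p).map (fun j => s + (j : Int)))) := by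
  induction ps generalizing s d with
  | nil =>
    cases hd : d.get? p <;> simp [PySem.List.enumerate, PySem.List.index?, Option.orElse, hd]
  | cons x t ih =>
    rw [show PySem.List.enumerate (x :: t) s = (s, x) :: PySem.List.enumerate t (s + 1) from by
      simp [PySem.List.enumerate]]
    simp only [List.foldl_cons]
    rw [ih]
    by_cases hc : d.contains x
    · rw [if_pos hc]
      by_cases hpx : p = x
      · subst hpx
        rw [PySem.List.index?_cons_self]
        have hsome : (d.get? p).isSome = true := by
          rw [← PySem.Dict.contains_eq_isSome_get? d p]; exact hc
        obtain ⟨v, hv⟩ := Option.isSome_iff_exists.mp hsome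
        simp [Option.orElse, hv]
      · rw [PySem.List.index?_cons_of_ne t (fun h => hpx h.symm)]
        cases hd : d.get? p with
        | some v => simp [Option.orElse]
        | none =>
          cases hjt : PySem.List.index? t p with
          | none => simp [Option.orElse]
          | some j => simp [Option.orElse]; omega
    · rw [if_neg hc]
      by_cases hpx : p = x
      · subst hpx
        rw [PySem.List.index?_cons_self]
        have hd : d.get? p = none := by
          cases hg : d.get? p with
          | none => rfl
          | some v =>
            rw [PySem.Dict.contains_eq_isSome_get?, hg] at hc
            simp at hc
        rw [PySem.Dict.get?_insert_self]
        simp [Option.orElse, hd]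
      · rw [PySem.Dict.get?_insert_of_ne d _ hpx]
        rw [PySem.List.index?_cons_of_ne t (fun h => hpx h.symm)]
        cases hd : d.get? p with
        | some v => simp [Option.orElse]
        | none =>
          cases hjt : PySem.List.index? t p with
          | none => simp [Option.orElse]
          | some j => simp [Option.orElse]; omega

-- two lists of naturals with the same elements have the same minimum
theorem pv_min?_congr (l1 l2 : List Nat) (h : ∀ v, v ∈ l1 ↔ v ∈ l2) : l1.min? = l2.min? := by
  cases l1 with
  | nil => cases l2 with
    | nil => rfl
    | cons y t => exact absurd ((h y).mpr (List.mem_cons_self)) (by simp)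
  | cons x s =>
    cases l2 with
    | nil => exact absurd ((h x).mp (List.mem_cons_self)) (by simp)
    | cons y t =>
      have h1 := List.min?_eq_some_iff.mp (List.min?_cons' (x := x) (xs := s))
      have h2 := List.min?_eq_some_iff.mp (List.min?_cons' (x := y) (xs := t))
      rw [List.min?_cons', List.min?_cons']
      congr 1
      exact Nat.le_antisymm (h1.2 _ ((h _).mpr h2.1)) (h2.2 _ ((h _).mp h1.1))

-- a sum over a filtered list in occurrence order equals the count-weighted sum
-- over any duplicate-free list with the same matched elements
theorem pv_sum_filter_eq_sum_count (b : List String) (q : String → Bool) (K : List String)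
    (hnd : K.Nodup) (hmem : ∀ p, p ∈ K ↔ p ∈ b ∧ q p = true) (f : String → Int) :
    ((b.filter q).map f).sum = (K.map (fun p => (b.count p : Int) * f p)).sum := by
  rw [Finset.sum_list_map_count]
  rw [← List.sum_toFinset _ hnd]
  have hK : K.toFinset = (b.filter q).toFinset := by
    ext p
    simp only [List.mem_toFinset, List.mem_filter, hmem]
  rw [hK]
  refine Finset.sum_congr rfl ?_
  intro m hm
  rw [List.mem_toFinset, List.mem_filter] at hm
  rw [List.count_filter hm.2, nsmul_eq_mul]

-- the per-basket equality: A's row-per-occurrence zip-sum = B's count-weighted sum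
theorem basket_eq (products : List String) (category : List (List Int)) (b : List String) :
    agg_sum_zip ((b.filter (fun p => decide (p ∈ products))).map
      (fun p => (PySem.List.pyGet? category (((PySem.List.index? products p).getD 0 : Nat) : Int)).getD []))
    = agg_vec_basket b
        ((PySem.List.enumerate products).foldl
          (fun d ip => if d.contains ip.2 then d else d.insert ip.2 ip.1) PySem.Dict.empty)
        category := by
  set rowOf := fun p => (PySem.List.pyGet? category (((PySem.List.index? products p).getD 0 : Nat) : Int)).getD [] with hrowOf
  set q := fun p : String => decide (p ∈ products) with hq
  set first := (PySem.List.enumerate products).foldl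
      (fun d ip => if d.contains ip.2 then d else d.insert ip.2 ip.1) PySem.Dict.empty with hfirst
  have hget : ∀ p, first.get? p = (PySem.List.index? products p).map (fun j => (j : Int)) := by
    intro p
    rw [hfirst, first_fold_get?]
    cases hj : PySem.List.index? products p <;> simp [Option.orElse]
  have hcon : ∀ p, first.contains p = q p := by
    intro p
    rw [PySem.Dict.contains_eq_isSome_get?, hget p, hq]
    cases hj : PySem.List.index? products p with
    | none =>
      have := (PySem.List.index?_eq_none_iff products p).mp hj
      simp [this]
    | some j =>
      have : (PySem.List.index? products p).isSome = true := by rw [hj]; rfl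
      have := (PySem.List.index?_isSome_iff products p).mp this
      simp [this]
  unfold agg_vec_basket
  have hcnt : b.foldl (fun d p => if first.contains p then d.insert p (d.getD p 0 + 1) else d)
      PySem.Dict.empty = PySem.Dict.counter (b.filter q) := by
    rw [PySem.List.foldl_if_eq_foldl_filter (p := fun p => first.contains p)]
    rw [List.filter_congr (fun p _ => hcon p)]
    rw [PySem.Dict.foldl_insert_getD_add_one_eq_counter]
  simp only [hcnt, PySem.Dict.items_counter]
  set M := b.filter q with hM
  set K := PySem.Set.ofList M with hKset
  have hndK : K.Nodup := PySem.Set.nodup_ofList M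
  have hmemK : ∀ p, p ∈ K ↔ p ∈ b ∧ q p = true := by
    intro p
    rw [hKset, PySem.Set.mem_ofList, hM, List.mem_filter]
  have hrows : (K.map (fun k => (k, (M.count k : Int)))).map
        (fun pc => (pc.2, (PySem.List.pyGet? category (first.getD pc.1 0)).getD []))
      = K.map (fun p => ((b.count p : Int), rowOf p)) := by
    rw [List.map_map]
    refine List.map_congr_left ?_
    intro p hp
    obtain ⟨hpb, hpq⟩ := (hmemK p).mp hp
    have hpmem : p ∈ products := by simpa [hq] using hpq
    obtain ⟨j, hj⟩ := Option.isSome_iff_exists.mp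
      ((PySem.List.index?_isSome_iff products p).mpr hpmem)
    have hcount : M.count p = b.count p := by rw [hM]; exact List.count_filter hpq
    have hgd : first.getD p 0 = ((j : Nat) : Int) := by
      rw [PySem.Dict.getD_eq_get?_getD, hget p, hj]
      rfl
    simp only [Function.comp, hcount, hgd, hrowOf, hj, Option.getD_some]
  rw [hrows]
  cases hMc : M with
  | nil =>
    have hKnil : K = [] := by
      rw [List.eq_nil_iff_forall_not_mem]
      intro p hp
      have : p ∈ M := (PySem.Set.mem_ofList M p).mp hp
      rw [hMc] at this
      simp at this
    rw [hKnil]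
    simp [agg_sum_zip]
  | cons m ms =>
    cases hKc : K with
    | nil =>
      exfalso
      have : m ∈ M := by rw [hMc]; exact List.mem_cons_self
      have := (PySem.Set.mem_ofList M m).mpr this
      rw [← hKset, hKc] at this
      simp at this
    | cons k ks =>
      simp only [List.map_cons, agg_sum_zip]
      -- the two minima agree
      have hmin : (ms.map rowOf).foldl (fun m w => min m w.length) (rowOf m).length
          = (ks.map (fun p => ((b.count p : Int), rowOf p))).foldl
              (fun m cv => min m cv.2.length) (rowOf k).length := by
        have hA : ((rowOf m :: ms.map rowOf).map List.length).min?
            = some ((ms.map rowOf).foldl (fun m w => min m w.length) (rowOf m).length) := by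
          rw [List.map_cons, List.min?_cons', List.foldl_map]
        have hB : ((rowOf k :: ks.map rowOf).map List.length).min?
            = some ((ks.map (fun p => ((b.count p : Int), rowOf p))).foldl
                (fun m cv => min m cv.2.length) (rowOf k).length) := by
          rw [List.map_cons, List.min?_cons', List.map_map, List.foldl_map]
          simp [List.foldl_map, Function.comp]
        have hsame : ∀ v, v ∈ (rowOf m :: ms.map rowOf).map List.length
            ↔ v ∈ (rowOf k :: ks.map rowOf).map List.length := by
          intro v
          have e1 : (rowOf m :: ms.map rowOf) = M.map rowOf := by rw [hMc]; simp
          have e2 : (rowOf k :: ks.map rowOf) = K.map rowOf := by rw [hKc]; simp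
          rw [e1, e2, List.map_map, List.map_map]
          simp only [List.mem_map, Function.comp]
          constructor
          · rintro ⟨p, hp, rfl⟩
            rw [hM, List.mem_filter] at hp
            exact ⟨p, (hmemK p).mpr hp, rfl⟩
          · rintro ⟨p, hp, rfl⟩
            exact ⟨p, by rw [hM, List.mem_filter]; exact (hmemK p).mp hp, rfl⟩
        have := pv_min?_congr _ _ hsame
        rw [hA, hB] at this
        exact Option.some.inj this
      rw [← hmin]
      refine List.map_congr_left ?_
      intro j hj
      -- column j: a plain sum over occurrences = a count-weighted sum over keys
      rw [PySem.List.foldl_add (rowOf m :: ms.map rowOf) (fun w => w.getD j 0) 0,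
          PySem.List.foldl_add (((b.count k : Int), rowOf k) :: ks.map (fun p => ((b.count p : Int), rowOf p))) (fun cv => cv.1 * cv.2.getD j 0) 0]
      have e1 : rowOf m :: ms.map rowOf = M.map rowOf := by rw [hMc]; simp
      have e2 : (((b.count k : Int), rowOf k) :: ks.map (fun p => ((b.count p : Int), rowOf p)))
          = K.map (fun p => ((b.count p : Int), rowOf p)) := by rw [hKc]; simp
      rw [show ((rowOf m :: ms.map rowOf).map (fun w => w.getD j 0))
            = (M.map rowOf).map (fun w => w.getD j 0) by rw [e1]]
      rw [show ((((b.count k : Int), rowOf k) :: ks.map (fun p => ((b.count p : Int), rowOf p))).map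
              (fun cv : Int × List Int => cv.1 * cv.2.getD j 0))
            = (K.map (fun p => ((b.count p : Int), rowOf p))).map
              (fun cv : Int × List Int => cv.1 * cv.2.getD j 0) by rw [e2]]
      rw [List.map_map, List.map_map, hM]
      simp only [zero_add]
      exact pv_sum_filter_eq_sum_count b q K hndK hmemK
        (fun p => (rowOf p).getD j 0)

-- ===== VERDICT (by name: the statement is the Claim_ definition above) =====
theorem agg_vec_spec : Claim_equal_agg_vec := by
  intro baskets products category _ _
  unfold Spec_agg_vec agg_vec agg_vec_alt
  rw [PySem.List.foldl_append_singleton_eq_map]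
  simp only [List.nil_append]
  refine List.map_congr_left ?_
  intro b _
  rw [PySem.List.foldl_append_ite (p := fun p => p ∈ products)
    (f := fun p => (PySem.List.pyGet? category (((PySem.List.index? products p).getD 0 : Nat) : Int)).getD [])]
  simp only [List.nil_append]
  exact basket_eq products category b
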